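-- pv_equiv track=rewrite | github.com/tanmayc07/leetcode | 3912-valid-elements-in-an-array/3912-valid-elements-in-an-array.py | findValidElements
-- ===== SOURCE A (Python) =====
-- def findValidElements(nums: list[int]) -> list[int]:
--     if len(nums)<=2: return nums
--     res = [nums[0]]
--     for i in range(1, len(nums)-1):
--         f1 = True
--         for j in range(0, i):
--             if nums[j] >= nums[i]:
--                 f1 = False
--                 break
--
--         f2 = True
--         for j in range(i+1, len(nums)):
--             if nums[j] >= nums[i]:
--                 f2 = False
--                 break
--
--         if f1 or f2: res.append(nums[i])
--
--     res.append(nums[-1])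
--     return res
-- ===== SOURCE B (Python) =====
-- def findValidElements(nums: list[int]) -> list[int]:
--     n = len(nums)
--     if n <= 2:
--         return nums
--     mid = nums[1:-1]
--     pre = []                    # pre[k] = max of all elements before mid[k]
--     m = nums[0]
--     for x in mid:
--         pre.append(m)
--         m = m if m > x else x
--     suf = []                    # suf[k] = max of all elements after mid[k]
--     m = nums[-1]
--     for x in reversed(mid):
--         suf.append(m)
--         m = m if m > x else x
--     suf.reverse()
--     keep = [x for (x, p), s in zip(zip(mid, pre), suf) if x > p or x > s]
--     return [nums[0]] + keep + [nums[-1]]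
-- ===== Notes on version B (the rewrite author's own statement) =====
-- stated objective: faster
-- what changed: Replaced A's per-element linear scans of everything before and after each interior element by precomputed prefix-maximum and suffix-maximum arrays (one pass each), making each keep-test O(1).
import Mathlib
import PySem

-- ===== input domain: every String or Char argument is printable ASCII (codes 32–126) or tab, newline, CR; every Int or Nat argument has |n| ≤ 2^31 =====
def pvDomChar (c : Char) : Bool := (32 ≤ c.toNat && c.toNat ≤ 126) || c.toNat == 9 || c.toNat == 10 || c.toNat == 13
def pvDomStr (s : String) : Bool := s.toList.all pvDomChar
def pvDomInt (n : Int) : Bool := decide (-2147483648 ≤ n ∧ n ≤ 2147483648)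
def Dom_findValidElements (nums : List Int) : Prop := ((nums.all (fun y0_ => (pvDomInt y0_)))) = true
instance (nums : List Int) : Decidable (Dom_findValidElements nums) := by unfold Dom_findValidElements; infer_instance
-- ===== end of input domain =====

-- B replaces A's per-element scans over the whole list by precomputed prefix-/suffix-maximum arrays; objective: faster.

-- ===== PORT A =====
def findValidElements (nums : List Int) : List Int :=
  if nums.length ≤ 2 then nums
  else
    let res : List Int := [PySem.List.pyGetD nums 0 0]
    let res := (PySem.List.pyRange 1 ((nums.length : Int) - 1) 1).foldl
      (fun res i =>
        let f1 := (PySem.List.pyRange 0 i 1).foldl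
          (fun ok j => if PySem.List.pyGetD nums j 0 ≥ PySem.List.pyGetD nums i 0 then false else ok) true
        let f2 := (PySem.List.pyRange (i + 1) ((nums.length : Int)) 1).foldl
          (fun ok j => if PySem.List.pyGetD nums j 0 ≥ PySem.List.pyGetD nums i 0 then false else ok) true
        if f1 || f2 then res ++ [PySem.List.pyGetD nums i 0] else res) res
    res ++ [PySem.List.pyGetD nums (-1) 0]

-- ===== PORT B =====
-- running-maximum scan used twice by Source B (the `pre` and `suf` building loops)
def scanMaxB (m : Int) (xs : List Int) : List Int × Int :=
  xs.foldl (fun acc x => (acc.1 ++ [acc.2], if acc.2 > x then acc.2 else x)) ([], m)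

def findValidElements_alt (nums : List Int) : List Int :=
  if nums.length ≤ 2 then nums
  else
    let mid := PySem.List.slice nums (some 1) (some (-1))
    let pre := (scanMaxB (PySem.List.pyGetD nums 0 0) mid).1
    let suf := ((scanMaxB (PySem.List.pyGetD nums (-1) 0) mid.reverse).1).reverse
    [PySem.List.pyGetD nums 0 0] ++
      ((((mid.zip pre).zip suf).filter (fun t => t.1.1 > t.1.2 || t.1.1 > t.2)).map (fun t => t.1.1)) ++
      [PySem.List.pyGetD nums (-1) 0]

-- ===== PRECONDITION & SPEC =====
def Spec_findValidElements (nums : List Int) (out : List Int) : Prop := out = findValidElements_alt nums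
instance (nums : List Int) (out : List Int) : Decidable (Spec_findValidElements nums out) := by unfold Spec_findValidElements; infer_instance

-- ===== CLAIM (what is proved, stated in full; the proofs are below) =====
def Claim_equal_findValidElements : Prop := ∀ (nums : List Int), Dom_findValidElements nums → Spec_findValidElements nums (findValidElements nums)

-- ===== LEMMAS AND PROOFS =====

-- common reference list: the interior elements kept, carrying the running prefix maximum `a`
-- (before-the-element maximum) and the fixed last element `b` as base of the suffix maximum
def keepRec (a b : Int) : List Int → List Int
  | [] => []
  | x :: rest =>
      (if a < x ∨ rest.foldl max b < x then [x] else []) ++ keepRec (max a x) b rest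

lemma foldl_max_push (l : List Int) (b x : Int) :
    l.foldl max (max b x) = max (l.foldl max b) x := by
  induction l generalizing b with
  | nil => rfl
  | cons y t ih =>
      simp only [List.foldl_cons]
      rw [show max (max b x) y = max (max b y) x by omega, ih]

lemma foldl_max_reverse (l : List Int) (b : Int) :
    l.reverse.foldl max b = l.foldl max b := by
  induction l generalizing b with
  | nil => rfl
  | cons y t ih =>
      simp only [List.reverse_cons, List.foldl_append, List.foldl_cons, List.foldl_nil, ih]
      rw [← foldl_max_push]

lemma lt_iff_foldl_max (l : List Int) (m0 v : Int) :
    l.foldl max m0 < v ↔ m0 < v ∧ ∀ y ∈ l, y < v := by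
  constructor
  · intro h
    exact ⟨lt_of_le_of_lt (PySem.List.le_foldl_max l m0).1 h,
           fun y hy => lt_of_le_of_lt ((PySem.List.le_foldl_max l m0).2 y hy) h⟩
  · intro ⟨h1, h2⟩
    rcases PySem.List.foldl_max_mem l m0 with h | h
    · omega
    · exact h2 _ h

-- A's "no earlier/later element ≥ v" flag as a comparison with a running maximum
lemma notAny_cons_eq (l : List Int) (m0 v : Int) :
    (!((m0 :: l).any (fun y => decide (v ≤ y)))) = decide (l.foldl max m0 < v) := by
  rw [Bool.eq_iff_iff]
  simp [lt_iff_foldl_max, not_le]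

lemma notAny_append_eq (l : List Int) (m0 v : Int) :
    (!((l ++ [m0]).any (fun y => decide (v ≤ y)))) = decide (l.foldl max m0 < v) := by
  rw [Bool.eq_iff_iff]
  simp [lt_iff_foldl_max, not_le]
  tauto

-- A's inner break-loop is a (negated) any
lemma breakAll (v : Int) (nums : List Int) (js : List Int) :
    js.foldl (fun ok j => if PySem.List.pyGetD nums j 0 ≥ v then false else ok) true
    = !(js.any (fun j => decide (v ≤ PySem.List.pyGetD nums j 0))) := by
  have h := PySem.List.foldl_if_false_eq (fun j => decide (v ≤ PySem.List.pyGetD nums j 0)) js true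
  simpa using h

lemma any_pyRange_take (xs : List Int) (p : Int → Bool) (j : Nat) (hj : j ≤ xs.length) :
    (PySem.List.pyRange 0 (j:Int) 1).any (fun i => p (PySem.List.pyGetD xs i 0)) = (xs.take j).any p := by
  induction j with
  | zero => simp
  | succ n ih =>
      rw [show ((n+1 : Nat) : Int) = (n : Int) + 1 by push_cast; ring,
          PySem.List.pyRange_one_succ_right (by positivity), List.any_append,
          ih (by omega), List.take_add_one]
      have h1 : xs[n]?.toList = [xs.getD n 0] := by
        rw [List.getElem?_eq_getElem (show n < xs.length by omega)]
        simp [List.getD, List.getElem?_eq_getElem (show n < xs.length by omega)]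
      simp [h1]

lemma any_pyRange_drop (xs : List Int) (p : Int → Bool) (i : Nat) :
    (PySem.List.pyRange (i:Int) (xs.length:Int) 1).any (fun j => p (PySem.List.pyGetD xs j 0)) = (xs.drop i).any p := by
  have h := PySem.List.map_pyGetD_pyRange' xs 0 (a := (i:Int)) (by positivity)
  simp only [Int.toNat_natCast] at h
  rw [← h, List.any_map]
  rfl

-- A's outer loop over interior indices equals keepRec
lemma rangeFold_eq_keepRec (mid : List Int) (a b : Int) (acc : List Int) :
    (List.range mid.length).foldl
      (fun res k =>
        if ((mid.take k).foldl max a < mid.getD k 0 ∨ (mid.drop (k + 1)).foldl max b < mid.getD k 0)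
        then res ++ [mid.getD k 0] else res) acc
    = acc ++ keepRec a b mid := by
  induction mid generalizing a acc with
  | nil => simp [keepRec]
  | cons x rest ih =>
      rw [List.length_cons, List.range_succ_eq_map]
      simp only [List.foldl_cons, List.foldl_map, List.getD_cons_zero,
        List.drop_succ_cons, List.drop_zero, Nat.succ_eq_add_one,
        List.take_succ_cons, List.getD_cons_succ, keepRec]
      rw [ih (max a x)]
      by_cases h : (a < x ∨ rest.foldl max b < x) <;> simp [h]

-- slicing off first and last element
lemma slice_mid (a b : Int) (mid : List Int) :
    PySem.List.slice (a :: mid ++ [b]) (some 1) (some (-1)) = mid := by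
  simp [PySem.List.slice, PySem.List.clampIdx]
  rw [if_neg (by omega)]
  simp

-- characterisation of B's scan loops
def preListB (a : Int) : List Int → List Int
  | [] => []
  | x :: rest => a :: preListB (max a x) rest

lemma scanMaxB_fold (xs : List Int) (l : List Int) (m : Int) :
    xs.foldl (fun acc x => (acc.1 ++ [acc.2], if acc.2 > x then acc.2 else x)) (l, m)
      = (l ++ preListB m xs, xs.foldl max m) := by
  induction xs generalizing l m with
  | nil => simp [preListB]
  | cons x rest ih =>
      simp only [List.foldl_cons, ih, preListB]
      rw [show (if m > x then m else x) = max m x by omega]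
      simp

lemma scanMaxB_spec (m : Int) (xs : List Int) :
    scanMaxB m xs = (preListB m xs, xs.foldl max m) := by
  simpa [scanMaxB] using scanMaxB_fold xs [] m

def sufListB (b : Int) : List Int → List Int
  | [] => []
  | x :: rest => rest.foldl max b :: sufListB b rest

lemma suf_spec (b : Int) (mid : List Int) :
    ((scanMaxB b mid.reverse).1).reverse = sufListB b mid := by
  induction mid with
  | nil => simp [scanMaxB, sufListB]
  | cons x rest ih =>
      have h : (scanMaxB b (rest.reverse ++ [x])).1
          = (scanMaxB b rest.reverse).1 ++ [(scanMaxB b rest.reverse).2] := by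
        simp only [scanMaxB, List.foldl_append, List.foldl_cons, List.foldl_nil]
      simp only [List.reverse_cons, h, List.reverse_append, List.reverse_cons, List.reverse_nil,
        List.nil_append, List.cons_append, sufListB]
      rw [ih, scanMaxB_spec]
      simp only [foldl_max_reverse]

-- B's comprehension over the zipped triples equals keepRec
lemma zip_filter_eq_keepRec (mid : List Int) (a b : Int) :
    ((((mid.zip (preListB a mid)).zip (sufListB b mid)).filter
        (fun t => t.1.1 > t.1.2 || t.1.1 > t.2)).map (fun t => t.1.1)) = keepRec a b mid := by
  induction mid generalizing a with
  | nil => simp [preListB, sufListB, keepRec]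
  | cons x rest ih =>
      simp only [preListB, sufListB, List.zip_cons_cons, List.filter_cons, keepRec]
      by_cases h : (a < x ∨ rest.foldl max b < x)
      · rw [if_pos (by simpa [gt_iff_lt, Bool.or_eq_true, decide_eq_true_eq] using h)]
        simp only [List.map_cons, ih, if_pos h, List.singleton_append]
      · rw [if_neg (by simpa [gt_iff_lt, Bool.or_eq_true, decide_eq_true_eq] using h)]
        simp only [ih, if_neg h, List.nil_append]

-- each port on a decomposed list
lemma portA_eq (a b : Int) (mid : List Int) (hm : mid ≠ []) :
    findValidElements (a :: mid ++ [b]) = a :: keepRec a b mid ++ [b] := by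
  have hpos : 0 < mid.length := List.length_pos_iff.mpr hm
  have h0 : PySem.List.pyGetD (a :: mid ++ [b]) 0 0 = a := by
    simp [PySem.List.pyGetD_zero]
  have hL : PySem.List.pyGetD (a :: mid ++ [b]) (-1) 0 = b :=
    PySem.List.pyGetD_neg_one_append_singleton (a :: mid) b 0
  rw [findValidElements, if_neg (by simp <;> omega)]
  simp only [h0, hL]
  rw [PySem.List.pyRange_one, show ((((a :: mid ++ [b]).length : Int) - 1) - 1).toNat = mid.length by simp,
      List.foldl_map]
  rw [PySem.List.foldl_congr_mem (List.range mid.length) _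
      (fun res k =>
        if ((mid.take k).foldl max a < mid.getD k 0 ∨ (mid.drop (k + 1)).foldl max b < mid.getD k 0)
        then res ++ [mid.getD k 0] else res) _ ?_]
  · rw [rangeFold_eq_keepRec]
    simp
  · intro acc k hk
    rw [List.mem_range] at hk
    have hv : PySem.List.pyGetD (a :: mid ++ [b]) (1 + (k:Int)) 0 = mid.getD k 0 := by
      rw [show (1 + (k:Int)) = ((k+1 : Nat) : Int) by push_cast; ring, PySem.List.pyGetD_natCast,
          List.getD_eq_getElem _ _ (show k + 1 < (a :: mid ++ [b]).length by simp <;> omega),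
          List.getD_eq_getElem _ _ hk,
          List.getElem_append_left (show k + 1 < (a :: mid).length by simp <;> omega)]
      simp
    simp only [hv, breakAll]
    rw [show (1 + (k:Int)) = ((k+1 : Nat) : Int) by push_cast; ring]
    rw [any_pyRange_take (a :: mid ++ [b]) (fun y => decide (mid.getD k 0 ≤ y)) (k+1) (by simp <;> omega)]
    rw [show (((k+1 : Nat) : Int) + 1) = ((k+2 : Nat) : Int) by push_cast; ring]
    rw [any_pyRange_drop (a :: mid ++ [b]) (fun y => decide (mid.getD k 0 ≤ y)) (k+2)]
    rw [show (a :: mid ++ [b]).take (k+1) = a :: mid.take k by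
          rw [List.take_append_of_le_length (show k + 1 ≤ (a :: mid).length by simp <;> omega),
              List.take_succ_cons]]
    rw [show (a :: mid ++ [b]).drop (k+2) = mid.drop (k+1) ++ [b] by
          rw [List.drop_append_of_le_length (show k + 2 ≤ (a :: mid).length by simp <;> omega),
              show k + 2 = (k+1) + 1 by ring, List.drop_succ_cons]]
    rw [notAny_cons_eq, notAny_append_eq]
    simp only [Bool.or_eq_true, decide_eq_true_eq]

lemma suf_spec' (b : Int) (mid : List Int) :
    (preListB b mid.reverse).reverse = sufListB b mid := by
  have h := suf_spec b mid
  rwa [scanMaxB_spec] at h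

lemma portB_eq (a b : Int) (mid : List Int) (hm : mid ≠ []) :
    findValidElements_alt (a :: mid ++ [b]) = a :: keepRec a b mid ++ [b] := by
  have hpos : 0 < mid.length := List.length_pos_iff.mpr hm
  have h0 : PySem.List.pyGetD (a :: mid ++ [b]) 0 0 = a := by
    simp [PySem.List.pyGetD_zero]
  have hL : PySem.List.pyGetD (a :: mid ++ [b]) (-1) 0 = b :=
    PySem.List.pyGetD_neg_one_append_singleton (a :: mid) b 0
  rw [findValidElements_alt, if_neg (by simp <;> omega)]
  simp only [h0, hL, slice_mid, scanMaxB_spec]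
  rw [suf_spec', zip_filter_eq_keepRec]
  simp

lemma decomp (nums : List Int) (h : 3 ≤ nums.length) :
    ∃ a mid b, nums = a :: mid ++ [b] ∧ mid ≠ [] := by
  match nums with
  | x :: (y :: rest) =>
    refine ⟨x, (y :: rest).dropLast, (y :: rest).getLast (by simp), ?_, ?_⟩
    · simp [List.dropLast_append_getLast]
    · simp only [List.length_cons] at h
      cases rest with
      | nil => simp at h
      | cons z t => simp

-- ===== VERDICT (by name: the statement is the Claim_ definition above) =====
theorem findValidElements_spec : Claim_equal_findValidElements := by
  intro nums _
  unfold Spec_findValidElements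
  by_cases h : nums.length ≤ 2
  · rw [findValidElements, findValidElements_alt, if_pos h, if_pos h]
  · obtain ⟨a, mid, b, rfl, hm⟩ := decomp nums (by omega)
    rw [portA_eq a b mid hm, portB_eq a b mid hm]
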